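-- pv_equiv track=rewrite | github.com/GabooMZ/Pensamiento-Compu-TC1028.419 | Pensamiento Compu TC1028.419/Busca_Perras/only_functions.py | regular_matrix
-- ===== SOURCE A (Python) =====
-- def regular_matrix(main_matrix):
--     del main_matrix[0]
--     del main_matrix[-1]
--     for row_index, row in enumerate(main_matrix):
--         for col_index, col_val in enumerate(row):
--             if col_index == 0 or col_index == (len(main_matrix[row_index]) - 1):
--                 del row[col_index]
--     return main_matrix
-- ===== SOURCE B (Python) =====
-- def regular_matrix(main_matrix):
--     del main_matrix[0]
--     del main_matrix[-1]
--     for row in main_matrix: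
--         if row:
--             del row[0]
--         if len(row) > 1:
--             del row[-1]
--     return main_matrix
-- ===== Notes on version B (the rewrite author's own statement) =====
-- stated objective: simpler
-- what changed: B trims each interior row with at most two direct end deletions (del row[0], then del row[-1] when more than one element remains) instead of A's inner enumerate scan over every column index compared against the shrinking row.
import Mathlib
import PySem

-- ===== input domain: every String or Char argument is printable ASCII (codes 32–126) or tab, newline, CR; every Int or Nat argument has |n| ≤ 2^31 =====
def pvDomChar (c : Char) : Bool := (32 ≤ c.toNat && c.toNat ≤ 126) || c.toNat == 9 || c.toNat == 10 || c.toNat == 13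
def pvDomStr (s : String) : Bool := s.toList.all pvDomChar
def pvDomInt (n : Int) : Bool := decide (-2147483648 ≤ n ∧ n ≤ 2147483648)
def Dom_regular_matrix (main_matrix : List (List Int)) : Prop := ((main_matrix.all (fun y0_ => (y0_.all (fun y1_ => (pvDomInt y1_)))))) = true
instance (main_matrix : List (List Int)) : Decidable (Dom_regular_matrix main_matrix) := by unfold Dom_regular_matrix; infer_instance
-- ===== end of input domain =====

-- B replaces A's inner column scan by at most two direct end deletions per row ('simpler');
-- both A and B mutate main_matrix in place identically, and the proved equivalence is about the return value.

-- ===== PORT A =====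
-- inner 'for col_index, col_val in enumerate(row)' loop of A: the index advances by one each
-- step while 'del row[col_index]' may shrink the row; stops when the index reaches len(row).
def pvARow (i : Nat) (row : List Int) : List Int :=
  if i < row.length then
    if i = 0 ∨ i = row.length - 1 then pvARow (i + 1) (row.eraseIdx i)
    else pvARow (i + 1) row
  else row
termination_by row.length - i
decreasing_by
  · have : (row.eraseIdx i).length = row.length - 1 := by
      simp [List.length_eraseIdx, *]
    omega
  · omega

def regular_matrix (main_matrix : List (List Int)) : List (List Int) :=
  match main_matrix with
  | [] => []                     -- Python raises IndexError here (del main_matrix[0]); outside Pre_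
  | _ :: rest =>                 -- del main_matrix[0]
    let m := rest.dropLast       -- del main_matrix[-1] (raises when rest = []; outside Pre_)
    m.map (fun row => pvARow 0 row)

-- ===== PORT B =====
def pvBRow (row : List Int) : List Int :=
  let r := match row with        -- if row: del row[0]
    | [] => []
    | _ :: t => t
  if r.length > 1 then r.dropLast else r   -- if len(row) > 1: del row[-1]

def regular_matrix_alt (main_matrix : List (List Int)) : List (List Int) :=
  match main_matrix with
  | [] => []                     -- Python raises IndexError here; outside Pre_
  | _ :: rest =>                 -- del main_matrix[0]
    (rest.dropLast).map pvBRow   -- del main_matrix[-1]; then trim each remaining row's ends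

-- ===== PRECONDITION & SPEC =====
-- Pre_ excludes exactly the inputs with fewer than two rows, on which the Python A
-- (and B) raises IndexError at 'del main_matrix[0]' / 'del main_matrix[-1]'.
def Pre_regular_matrix (main_matrix : List (List Int)) : Prop := 2 ≤ main_matrix.length
instance (main_matrix : List (List Int)) : Decidable (Pre_regular_matrix main_matrix) := by unfold Pre_regular_matrix; infer_instance
def pvWitness_regular_matrix : List (List Int) := [[1, 2, 3], [4, 5, 6], [7, 8, 9]]

def Spec_regular_matrix (main_matrix : List (List Int)) (out : List (List Int)) : Prop := out = regular_matrix_alt main_matrix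
instance (main_matrix : List (List Int)) (out : List (List Int)) : Decidable (Spec_regular_matrix main_matrix out) := by unfold Spec_regular_matrix; infer_instance

-- ===== CLAIM (what is proved, stated in full; the proofs are below) =====
def Claim_equal_regular_matrix : Prop := ∀ (main_matrix : List (List Int)), Dom_regular_matrix main_matrix → Pre_regular_matrix main_matrix → Spec_regular_matrix main_matrix (regular_matrix main_matrix)

-- ===== LEMMAS AND PROOFS =====

-- deleting the last index is dropLast
theorem pv_eraseIdx_last (l : List Int) : l.eraseIdx (l.length - 1) = l.dropLast := by
  induction l with
  | nil => rfl
  | cons a t ih =>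
    cases t with
    | nil => rfl
    | cons b u =>
      simp only [List.length_cons, List.dropLast]
      simpa using ih

-- from index 1 on, A's inner loop only ever fires at the last index: it drops the
-- last element iff the index is still inside the row
theorem pvARow_ge_one (i : Nat) (r : List Int) (hi : 1 ≤ i) :
    pvARow i r = if i < r.length then r.dropLast else r := by
  fun_induction pvARow i r with
  | case1 i r h hcond ih =>
    rcases hcond with h0 | hl
    · omega
    · have he : r.eraseIdx i = r.dropLast := by rw [hl, pv_eraseIdx_last]
      rw [he] at ih ⊢
      have hlen : r.dropLast.length = r.length - 1 := by simp
      rw [ih (by omega)]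
      have h1 : ¬ (i + 1 < r.dropLast.length) := by omega
      rw [if_neg h1, if_pos h]
  | case2 i r h hcond ih =>
    have hl : ¬ (i = r.length - 1) := by tauto
    rw [ih (by omega)]
    have : i + 1 < r.length := by omega
    simp [h, this]
  | case3 i r h =>
    simp [h]

theorem pvRow_eq (r : List Int) : pvARow 0 r = pvBRow r := by
  cases r with
  | nil => simp [pvARow, pvBRow]
  | cons a t =>
    unfold pvARow
    rw [if_pos (by simp), if_pos (Or.inl rfl)]
    show pvARow 1 t = pvBRow (a :: t)
    rw [pvARow_ge_one 1 t (le_refl 1)]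
    unfold pvBRow
    by_cases h : 1 < t.length <;> simp [h]

-- ===== VERDICT (by name: the statement is the Claim_ definition above) =====
theorem regular_matrix_spec : Claim_equal_regular_matrix := by
  intro m _ _
  unfold Spec_regular_matrix regular_matrix regular_matrix_alt
  cases m with
  | nil => rfl
  | cons a rest => simp [pvRow_eq]
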